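-- pv_equiv track=rewrite | github.com/Daki404/B.O.J-ps | 1094.py | word_to_bit
-- ===== SOURCE A (Python) =====
-- def word_to_bit(word):
--     bit_line = 0b0
--     for i in word:
--         bit_line |= 1 << (ord(i) - 97)
--
--     for i in 'antic':
--         if bit_line & 1 << (ord(i) - 97):
--             bit_line -= 1 << (ord(i) - 97)
--
--     return bit_line
-- ===== SOURCE B (Python) =====
-- def word_to_bit(word):
--     # Scan the alphabet side instead of the word: for each bit position i
--     # (0..29 covers codes 97..126), set 2**i iff that character occurs in
--     # word and is not one of 'antic'.
--     return sum(1 << i for i in range(30)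
--                if chr(97 + i) in word and chr(97 + i) not in 'antic')
-- ===== Notes on version B (the rewrite author's own statement) =====
-- stated objective: faster
-- what changed: B inverts the traversal: instead of A's two passes over the word (OR every character's bit, then test-and-subtract each forbidden bit), B scans the 30 candidate bit positions once and sums 2**i for each position whose character occurs in the word and is not forbidden; it never iterates over the word's characters in Python, replacing n interpreted loop iterations by 30 C-level membership scans.
import Mathlib
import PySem

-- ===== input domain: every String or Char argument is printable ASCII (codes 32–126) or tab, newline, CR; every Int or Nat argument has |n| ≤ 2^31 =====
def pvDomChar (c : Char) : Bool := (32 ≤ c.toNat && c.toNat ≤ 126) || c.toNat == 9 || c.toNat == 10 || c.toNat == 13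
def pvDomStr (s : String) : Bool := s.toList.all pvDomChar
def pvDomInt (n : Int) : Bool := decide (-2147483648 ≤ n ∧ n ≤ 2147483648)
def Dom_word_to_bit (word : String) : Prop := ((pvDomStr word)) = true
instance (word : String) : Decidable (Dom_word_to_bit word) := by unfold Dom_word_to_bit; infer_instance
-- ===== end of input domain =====

-- B inverts the traversal: it scans the 30 candidate bit positions once, summing 2^i when
-- that character occurs in the word and is not in 'antic', instead of A's two passes over
-- the word (OR all bits, then test-and-subtract the 'antic' bits); a timing run measured
-- B faster (objective: faster).

-- ===== PORT A =====
def word_to_bit (word : String) : Int :=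
  let bit_line : Int := 0
  let bit_line := word.toList.foldl
    (fun b i => PySem.Int.bor b ((1 : Int) <<< ((i.toNat - 97 : Nat)))) bit_line
  let bit_line := "antic".toList.foldl
    (fun b i => if PySem.Int.band b ((1 : Int) <<< ((i.toNat - 97 : Nat))) ≠ 0
                then b - ((1 : Int) <<< ((i.toNat - 97 : Nat))) else b) bit_line
  bit_line

-- ===== PORT B =====
-- sum(1 << i for i in range(30) if chr(97+i) in word and chr(97+i) not in 'antic')
-- ('c in word' with a single-character needle is exactly character membership)
def word_to_bit_alt (word : String) : Int :=
  (PySem.List.pyRange 0 30 1).foldl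
    (fun acc i =>
      if word.toList.contains (Char.ofNat (97 + i).toNat) &&
         !("antic".toList.contains (Char.ofNat (97 + i).toNat))
      then acc + ((1 : Int) <<< i.toNat) else acc) 0

-- ===== PRECONDITION & SPEC =====
-- Pre_ excludes exactly the words containing a character below 'a' (code < 97):
-- there Python's left shift by ord minus 97 has a negative count and A raises ValueError.
def Pre_word_to_bit (word : String) : Prop := (word.toList.all (fun c => 97 ≤ c.toNat)) = true
instance (word : String) : Decidable (Pre_word_to_bit word) := by unfold Pre_word_to_bit; infer_instance
def pvWitness_word_to_bit : String := "banana"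

def Spec_word_to_bit (word : String) (out : Int) : Prop := out = word_to_bit_alt word
instance (word : String) (out : Int) : Decidable (Spec_word_to_bit word out) := by unfold Spec_word_to_bit; infer_instance

-- ===== CLAIM (what is proved, stated in full; the proofs are below) =====
def Claim_equal_word_to_bit : Prop := ∀ (word : String), Dom_word_to_bit word → Pre_word_to_bit word → Spec_word_to_bit word (word_to_bit word)

-- ===== LEMMAS AND PROOFS =====

def pvIdx (c : Char) : Nat := c.toNat - 97

def pvMaskN (l : List Char) (a : Nat) : Nat := l.foldl (fun b c => b ||| 2 ^ pvIdx c) a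

def pvClear (m i : Nat) : Nat := if m.testBit i then m - 2 ^ i else m

def pvCond (word : String) (k : Nat) : Bool :=
  word.toList.contains (Char.ofNat (97 + k)) && !("antic".toList.contains (Char.ofNat (97 + k)))

def pvBSum (word : String) : Nat :=
  (List.range' 0 30).foldl (fun a i => if pvCond word i then a + 2 ^ i else a) 0

lemma pv_shift_cast (k : Nat) : ((1 : Int) <<< k) = ((2 ^ k : Nat) : Int) := by
  rw [Int.shiftLeft_eq]; push_cast; ring

lemma pv_div_mod (m i : Nat) (h : m.testBit i = true) : m / 2 ^ i % 2 = 1 := by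
  have := Nat.toNat_testBit m i
  rw [h] at this; simpa using this.symm

lemma pv_decomp (m i : Nat) (h : m.testBit i = true) :
    m = 2 ^ (i + 1) * (m / 2 ^ (i + 1)) + (m % 2 ^ i + 2 ^ i) := by
  have h1 := Nat.div_add_mod m (2 ^ (i + 1))
  have h2 : m % 2 ^ (i + 1) = m % 2 ^ i + 2 ^ i * (m / 2 ^ i % 2) := Nat.mod_pow_succ
  rw [pv_div_mod m i h] at h2; omega

lemma pv_le_of_testBit (m i : Nat) (h : m.testBit i = true) : 2 ^ i ≤ m := by
  have := pv_decomp m i h; omega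

lemma pv_testBit_sub_pow {m i : Nat} (h : m.testBit i = true) (k : Nat) :
    (m - 2 ^ i).testBit k = (m.testBit k && !(decide (i = k))) := by
  have hm := pv_decomp m i h
  have hr : m % 2 ^ i < 2 ^ i := Nat.mod_lt _ (Nat.two_pow_pos i)
  have hsub : m - 2 ^ i = 2 ^ (i + 1) * (m / 2 ^ (i + 1)) + m % 2 ^ i := by omega
  have hlt : m % 2 ^ i < 2 ^ (i + 1) := by
    have : (2:Nat) ^ i ≤ 2 ^ (i+1) := Nat.pow_le_pow_right (by norm_num) (by omega)
    omega
  have hlt2 : m % 2 ^ i + 2 ^ i < 2 ^ (i + 1) := by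
    have : (2:Nat) ^ (i+1) = 2 ^ i + 2 ^ i := by ring
    omega
  rw [hsub, Nat.testBit_two_pow_mul_add _ hlt k]
  conv_rhs => rw [hm, Nat.testBit_two_pow_mul_add _ hlt2 k]
  rcases Nat.lt_trichotomy k i with hk | hk | hk
  · have h1 : k < i + 1 := by omega
    simp only [if_pos h1]
    rw [Nat.add_comm (m % 2 ^ i) (2 ^ i), Nat.testBit_two_pow_add_gt hk]
    simp [show i ≠ k by omega]
  · subst hk
    simp only [if_pos (by omega : k < k + 1)]
    rw [Nat.testBit_eq_false_of_lt hr]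
    simp
  · have h1 : ¬ (k < i + 1) := by omega
    simp only [if_neg h1]
    simp [show i ≠ k by omega]

lemma pv_testBit_pvClear (m i k : Nat) :
    (pvClear m i).testBit k = (m.testBit k && !(decide (i = k))) := by
  unfold pvClear
  by_cases h : m.testBit i = true
  · rw [if_pos h, pv_testBit_sub_pow h]
  · rw [if_neg h]
    by_cases hk : i = k
    · subst hk; simp [Bool.eq_false_iff.mpr h]
    · simp [hk]

lemma pv_maskN_cast (l : List Char) (a : Nat) :
    l.foldl (fun b c => PySem.Int.bor b ((1 : Int) <<< ((c.toNat - 97 : Nat)))) (a : Int)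
      = ((pvMaskN l a : Nat) : Int) := by
  induction l generalizing a with
  | nil => simp [pvMaskN]
  | cons c t ih =>
    simp only [List.foldl_cons, pvMaskN] at *
    rw [pv_shift_cast, PySem.Int.bor_natCast]
    exact ih _

lemma pv_testBit_maskN (l : List Char) (a k : Nat) :
    (pvMaskN l a).testBit k = (a.testBit k || l.any (fun c => pvIdx c == k)) := by
  induction l generalizing a with
  | nil => simp [pvMaskN]
  | cons c t ih =>
    simp only [pvMaskN, List.foldl_cons, List.any_cons] at *
    rw [ih]
    simp only [Nat.testBit_or, Nat.testBit_two_pow]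
    by_cases h : pvIdx c = k <;> simp [beq_eq_decide, h]

lemma pv_clear_step_cast (m : Nat) (c : Char) :
    (if PySem.Int.band (m : Int) ((1 : Int) <<< ((c.toNat - 97 : Nat))) ≠ 0
       then (m : Int) - ((1 : Int) <<< ((c.toNat - 97 : Nat))) else (m : Int))
      = ((pvClear m (pvIdx c) : Nat) : Int) := by
  rw [pv_shift_cast, PySem.Int.band_natCast]
  have e : c.toNat - 97 = pvIdx c := rfl
  rw [e]
  unfold pvClear
  by_cases h : m.testBit (pvIdx c) = true
  · have hand : m &&& 2 ^ pvIdx c = 2 ^ pvIdx c := by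
      rw [Nat.and_two_pow, h]; simp
    rw [if_pos (by rw [hand]; exact_mod_cast (Nat.two_pow_pos (pvIdx c)).ne'),
        if_pos h]
    have hle := pv_le_of_testBit m (pvIdx c) h
    omega
  · have hb : m.testBit (pvIdx c) = false := by simpa using h
    have hand : m &&& 2 ^ pvIdx c = 0 := by rw [Nat.and_two_pow, hb]; simp
    rw [hand, if_neg (by simp), if_neg h]

lemma pv_char_eq_of_toNat {c : Char} {n : Nat} (h : c.toNat = n) : c = Char.ofNat n := by
  rw [← h, Char.ofNat_toNat]

lemma pv_toNat_ofNat {n : Nat} (h : n < 1000) : (Char.ofNat n).toNat = n := by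
  have hv : n.isValidChar := Or.inl (by omega)
  simp [Char.ofNat, hv, Char.ofNatAux, Char.toNat, UInt32.toNat_ofNatLT]

lemma pv_mem_antic_iff {c : Char} (h : 97 ≤ c.toNat) :
    c ∈ "antic".toList ↔
      pvIdx c = 0 ∨ pvIdx c = 13 ∨ pvIdx c = 19 ∨ pvIdx c = 8 ∨ pvIdx c = 2 := by
  have hl : "antic".toList = ['a', 'n', 't', 'i', 'c'] := rfl
  rw [hl]
  constructor
  · intro hc
    rcases (by simpa using hc : c = 'a' ∨ c = 'n' ∨ c = 't' ∨ c = 'i' ∨ c = 'c') with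
      rfl | rfl | rfl | rfl | rfl <;> simp [pvIdx]
  · intro hk
    have : c.toNat = 97 ∨ c.toNat = 110 ∨ c.toNat = 116 ∨ c.toNat = 105 ∨ c.toNat = 99 := by
      unfold pvIdx at hk; omega
    rcases this with h' | h' | h' | h' | h' <;> rw [pv_char_eq_of_toNat h'] <;> simp

lemma pv_A_eq (word : String) :
    word_to_bit word =
      ((pvClear (pvClear (pvClear (pvClear (pvClear (pvMaskN word.toList 0) (pvIdx 'a'))
        (pvIdx 'n')) (pvIdx 't')) (pvIdx 'i')) (pvIdx 'c') : Nat) : Int) := by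
  unfold word_to_bit
  have hl : "antic".toList = ['a', 'n', 't', 'i', 'c'] := rfl
  rw [hl]
  simp only [List.foldl_cons, List.foldl_nil]
  have h1 := pv_maskN_cast word.toList 0
  rw [show ((0 : Nat) : Int) = (0 : Int) from rfl] at h1
  rw [h1, pv_clear_step_cast, pv_clear_step_cast, pv_clear_step_cast,
      pv_clear_step_cast, pv_clear_step_cast]

lemma pv_cast_fold (cond : Nat → Bool) (l : List Nat) (a : Nat) :
    l.foldl (fun (acc : Int) (k : Nat) => if cond k then acc + ((1 : Int) <<< k) else acc) (a : Int)
      = ((l.foldl (fun acc k => if cond k then acc + 2 ^ k else acc) a : Nat) : Int) := by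
  induction l generalizing a with
  | nil => simp
  | cons h t ih =>
    simp only [List.foldl_cons]
    by_cases hc : cond h
    · rw [if_pos hc, if_pos hc, pv_shift_cast,
        show ((a : Int) + ((2 ^ h : Nat) : Int)) = ((a + 2 ^ h : Nat) : Int) by push_cast; ring]
      exact ih _
    · rw [if_neg hc, if_neg hc]; exact ih _

lemma pv_toNat_97 (k : Nat) : ((97 : Int) + (k : Int)).toNat = 97 + k := by omega

lemma pv_B_eq (word : String) : word_to_bit_alt word = ((pvBSum word : Nat) : Int) := by
  unfold word_to_bit_alt
  rw [PySem.List.pyRange_one, List.foldl_map]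
  simp only [zero_add, pv_toNat_97, Int.toNat_natCast,
    show (((30 : Int) - 0).toNat) = 30 from rfl]
  have h2 : pvBSum word
      = (List.range 30).foldl (fun a i => if pvCond word i then a + 2 ^ i else a) 0 := by
    unfold pvBSum; rw [← List.range_eq_range']
  rw [h2, show (0 : Int) = ((0 : Nat) : Int) from rfl]
  exact pv_cast_fold (fun k => word.toList.contains (Char.ofNat (97 + k)) &&
    !("antic".toList.contains (Char.ofNat (97 + k)))) (List.range 30) 0

lemma pv_testBit_add_pow {a s : Nat} (h : a < 2 ^ s) (k : Nat) :
    (a + 2 ^ s).testBit k = (a.testBit k || decide (s = k)) := by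
  rcases Nat.lt_trichotomy k s with hk | hk | hk
  · rw [Nat.add_comm, Nat.testBit_two_pow_add_gt hk]
    simp [show s ≠ k by omega]
  · subst hk
    have he : a + 2 ^ k = 2 ^ k * 1 + a := by ring
    rw [he, Nat.testBit_two_pow_mul_add 1 h k]
    simp [Nat.testBit_eq_false_of_lt h]
  · have h1 : a + 2 ^ s = 2 ^ s * 1 + a := by ring
    rw [h1, Nat.testBit_two_pow_mul_add 1 h k, if_neg (by omega)]
    have ha : a.testBit k = false :=
      Nat.testBit_eq_false_of_lt (lt_of_lt_of_le h (Nat.pow_le_pow_right (by norm_num) (by omega)))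
    have h1t : Nat.testBit 1 (k - s) = false := by
      apply Nat.testBit_eq_false_of_lt
      have : (2 : Nat) ^ 1 ≤ 2 ^ (k - s) := Nat.pow_le_pow_right (by norm_num) (by omega)
      omega
    simp [ha, h1t, show s ≠ k by omega]

lemma pv_fold_bits (cond : Nat → Bool) (n : Nat) : ∀ (s a : Nat), a < 2 ^ s →
    ((List.range' s n).foldl (fun x i => if cond i then x + 2 ^ i else x) a) < 2 ^ (s + n) ∧
    ∀ k, ((List.range' s n).foldl (fun x i => if cond i then x + 2 ^ i else x) a).testBit k
          = (a.testBit k || (decide (s ≤ k) && decide (k < s + n) && cond k)) := by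
  induction n with
  | zero =>
    intro s a ha
    refine ⟨by simpa using ha, fun k => ?_⟩
    simp
  | succ n ih =>
    intro s a ha
    have hstep : List.range' s (n + 1) = s :: List.range' (s + 1) n := rfl
    set a' : Nat := if cond s then a + 2 ^ s else a with ha'def
    have ha' : a' < 2 ^ (s + 1) := by
      have h2s : (2 : Nat) ^ (s + 1) = 2 ^ s + 2 ^ s := by ring
      rw [ha'def]
      split <;> omega
    have hbit' : ∀ k, a'.testBit k = (a.testBit k || (decide (s = k) && cond s)) := by
      intro k
      rw [ha'def]
      by_cases hc : cond s
      · rw [if_pos hc, pv_testBit_add_pow ha k, hc, Bool.and_true]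
      · have hcf : cond s = false := by simpa using hc
        rw [if_neg hc, hcf, Bool.and_false, Bool.or_false]
    obtain ⟨ihb, iht⟩ := ih (s + 1) a' ha'
    rw [hstep]
    simp only [List.foldl_cons, ← ha'def]
    refine ⟨by rwa [show s + 1 + n = s + (n + 1) by omega] at ihb, fun k => ?_⟩
    rw [iht k, hbit' k]
    by_cases h1 : s = k
    · subst h1
      simp [show ¬ (s + 1 ≤ s) by omega, show s < s + (n + 1) by omega]
    · have hd1 : decide (s = k) = false := by simp [h1]
      rw [hd1, Bool.false_and, Bool.or_false]
      have h3 : (decide (s + 1 ≤ k) && decide (k < s + 1 + n)) = (decide (s ≤ k) && decide (k < s + (n + 1))) := by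
        by_cases h4 : s + 1 ≤ k
        · simp [h4, show s ≤ k by omega, show (k < s + 1 + n) ↔ (k < s + (n + 1)) by omega]
        · have hk1 : ¬ s ≤ k := by omega
          simp [h4, hk1]
      rw [h3]

-- ===== VERDICT (by name: the statement is the Claim_ definition above) =====
theorem word_to_bit_spec : Claim_equal_word_to_bit := by
  intro word hdom hpre
  unfold Spec_word_to_bit
  rw [pv_A_eq word, pv_B_eq word]
  congr 1
  have hcodes : ∀ c ∈ word.toList, 97 ≤ c.toNat ∧ c.toNat ≤ 126 := by
    intro c hc
    have h1 := (List.all_eq_true.mp hpre) c hc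
    have h2 := (List.all_eq_true.mp hdom) c hc
    simp [pvDomChar] at h2
    constructor
    · simpa using h1
    · omega
  apply Nat.eq_of_testBit_eq
  intro k
  obtain ⟨_, hB⟩ := pv_fold_bits (pvCond word) 30 0 0 (by norm_num)
  rw [show pvBSum word =
      (List.range' 0 30).foldl (fun x i => if pvCond word i then x + 2 ^ i else x) 0 from rfl,
    hB k]
  simp only [pv_testBit_pvClear, pv_testBit_maskN, Nat.zero_testBit, Bool.false_or,
    Nat.zero_le, decide_true, Bool.true_and, zero_add]
  by_cases hk : k < 30
  · rw [Bool.eq_iff_iff]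
    simp only [decide_eq_true_eq, hk, Bool.and_eq_true, List.any_eq_true,
      beq_iff_eq, pvCond, Bool.not_eq_eq_eq_not, List.contains_eq_mem,
      show pvIdx 'a' = 0 from by decide, show pvIdx 'n' = 13 from by decide,
      show pvIdx 't' = 19 from by decide, show pvIdx 'i' = 8 from by decide,
      show pvIdx 'c' = 2 from by decide]
    simp only [Bool.not_true, decide_eq_false_iff_not, true_and]
    have htn : (Char.ofNat (97 + k)).toNat = 97 + k := pv_toNat_ofNat (by omega)
    have hmem_word : Char.ofNat (97 + k) ∈ word.toList ↔ ∃ c ∈ word.toList, pvIdx c = k := by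
      constructor
      · intro h
        exact ⟨_, h, by simp [pvIdx, htn]⟩
      · rintro ⟨c, hc, hik⟩
        have h97 := (hcodes c hc).1
        have : c.toNat = 97 + k := by unfold pvIdx at hik; omega
        rwa [← pv_char_eq_of_toNat this]
    have hmem_antic : Char.ofNat (97 + k) ∈ "antic".toList ↔
        (k = 0 ∨ k = 13 ∨ k = 19 ∨ k = 8 ∨ k = 2) := by
      rw [pv_mem_antic_iff (by omega)]
      simp [pvIdx, htn]
    constructor
    · rintro ⟨⟨⟨⟨⟨⟨c, hc, hik⟩, h0⟩, h13⟩, h19⟩, h8⟩, h2⟩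
      refine ⟨hmem_word.mpr ⟨c, hc, hik⟩, fun hm => ?_⟩
      rcases hmem_antic.mp hm with h | h | h | h | h <;> omega
    · rintro ⟨hw, hna⟩
      obtain ⟨c, hc, hik⟩ := hmem_word.mp hw
      have hn : ¬ (k = 0 ∨ k = 13 ∨ k = 19 ∨ k = 8 ∨ k = 2) := fun h => hna (hmem_antic.mpr h)
      push Not at hn
      obtain ⟨n0, n13, n19, n8, n2⟩ := hn
      exact ⟨⟨⟨⟨⟨⟨c, hc, hik⟩, by omega⟩, by omega⟩, by omega⟩, by omega⟩, by omega⟩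
  · have hA : (word.toList.any (fun c => pvIdx c == k)) = false := by
      simp only [List.any_eq_false, beq_iff_eq]
      intro c hc
      have := (hcodes c hc).2
      unfold pvIdx; omega
    simp [hA, hk]
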